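-- pv_equiv track=rewrite | github.com/Kot141078/ester-clean-code | tools/dump_policy.py | _in_include_roots
-- ===== SOURCE A (Python) =====
-- from typing import Iterable, List, Sequence, Tuple
--
-- def _in_include_roots(rel: str, include_roots: Sequence[str]) -> bool:
--     rel_l = rel.lower()
--     for root in include_roots:
--         base = _norm_rel(root).lower()
--         if not base:
--             continue
--         if rel_l == base or rel_l.startswith(base + "/"):
--             return True
--     return False
--
-- def _norm_rel(path: str) -> str:
--     raw = str(path or "").replace("\\", "/").strip()
--     while raw.startswith("./"):
--         raw = raw[2:]
--     return raw.strip("/")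
-- ===== SOURCE B (Python) =====
-- def _norm_rel(path: str) -> str:
--     raw = str(path or "").replace("\\", "/").strip()
--     while raw.startswith("./"):
--         raw = raw[2:]
--     return raw.strip("/")
--
-- def _in_include_roots(rel, include_roots):
--     # Index the roots once, then look up rel's ancestor prefixes.
--     bases = {b for b in (_norm_rel(r).lower() for r in include_roots) if b}
--     rel_l = rel.lower()
--     candidates = [rel_l] + [rel_l[:i] for i, ch in enumerate(rel_l) if ch == "/"]
--     return any(c in bases for c in candidates)
-- ===== Notes on version B (the rewrite author's own statement) =====
-- stated objective: alternative
-- what changed: Instead of testing each root against rel with ==/startswith, B builds a set of normalized lowercased root bases once and checks whether any '/'-cut prefix of rel.lower() (or rel.lower() itself) is in that set.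
import Mathlib
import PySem

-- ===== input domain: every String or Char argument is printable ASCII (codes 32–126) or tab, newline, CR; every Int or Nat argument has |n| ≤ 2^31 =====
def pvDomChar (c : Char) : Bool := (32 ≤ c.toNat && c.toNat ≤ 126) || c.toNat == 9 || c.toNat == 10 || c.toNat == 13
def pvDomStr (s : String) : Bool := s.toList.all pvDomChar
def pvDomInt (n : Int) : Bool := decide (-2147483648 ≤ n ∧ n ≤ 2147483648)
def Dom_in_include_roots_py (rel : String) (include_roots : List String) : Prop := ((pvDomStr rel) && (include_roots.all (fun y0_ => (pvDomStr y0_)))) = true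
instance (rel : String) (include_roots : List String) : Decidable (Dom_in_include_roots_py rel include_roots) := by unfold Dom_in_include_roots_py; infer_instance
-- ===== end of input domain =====

-- B indexes the normalized roots in a set and looks up rel's '/'-cut prefixes, instead of scanning
-- the roots with ==/startswith as A does; return values are proved identical (same-cost alternative).

-- ===== PORT A =====
-- shared helper _norm_rel (used verbatim by both Pythons), on List Char
-- while raw.startswith("./"): raw = raw[2:]
def pvDropDotSlash : List Char → List Char
  | '.' :: '/' :: rest => pvDropDotSlash rest
  | cs => cs

def pvNormRel (cs : List Char) : List Char :=
  PySem.Chars.stripChars (pvDropDotSlash (PySem.Chars.strip (PySem.Chars.replace cs ['\\'] ['/']))) ['/']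

-- A's loop over include_roots
def pvLoopA (relL : List Char) : List String → Bool
  | [] => false
  | root :: rest =>
    let base := PySem.Chars.lower (pvNormRel root.toList)
    if base = [] then pvLoopA relL rest
    else if relL = base ∨ PySem.Chars.startswith relL (base ++ ['/']) = true then true
    else pvLoopA relL rest

def in_include_roots_py (rel : String) (include_roots : List String) : Bool :=
  pvLoopA (PySem.Chars.lower rel.toList) include_roots

-- ===== PORT B =====
def pvBases (include_roots : List String) : PySem.Set (List Char) :=
  PySem.Set.ofList ((include_roots.map (fun r => PySem.Chars.lower (pvNormRel r.toList))).filter (fun b => !b.isEmpty))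

def pvCandidates (relL : List Char) : List (List Char) :=
  relL :: ((PySem.List.enumerate relL 0).filter (fun p => p.2 == '/')).map
    (fun p => PySem.List.slice relL none (some p.1))

def in_include_roots_py_alt (rel : String) (include_roots : List String) : Bool :=
  let bases := pvBases include_roots
  (pvCandidates (PySem.Chars.lower rel.toList)).any (fun c => PySem.Set.contains bases c)

-- ===== PRECONDITION & SPEC =====
def Spec_in_include_roots_py (rel : String) (include_roots : List String) (out : Bool) : Prop := out = in_include_roots_py_alt rel include_roots
instance (rel : String) (include_roots : List String) (out : Bool) : Decidable (Spec_in_include_roots_py rel include_roots out) := by unfold Spec_in_include_roots_py; infer_instance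

-- ===== CLAIM (what is proved, stated in full; the proofs are below) =====
def Claim_equal_in_include_roots_py : Prop := ∀ (rel : String) (include_roots : List String), Dom_in_include_roots_py rel include_roots → Spec_in_include_roots_py rel include_roots (in_include_roots_py rel include_roots)

-- ===== LEMMAS AND PROOFS =====

-- one root matches A's test iff its base is a candidate prefix of relL (bases are nonempty in both)
lemma pv_match_iff (relL base : List Char) :
    (relL = base ∨ PySem.Chars.startswith relL (base ++ ['/']) = true) ↔ base ∈ pvCandidates relL := by
  rw [PySem.Chars.startswith_iff]
  unfold pvCandidates
  simp only [List.mem_cons, List.mem_map, List.mem_filter, beq_iff_eq,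
    PySem.List.mem_enumerate_iff]
  constructor
  · rintro (rfl | ⟨t, ht⟩)
    · exact Or.inl rfl
    · subst ht
      refine Or.inr ⟨((base.length : Int), '/'), ⟨⟨base.length, by simp, by simp⟩, rfl⟩, ?_⟩
      rw [PySem.List.slice_to _ (by positivity), Int.toNat_natCast,
        List.append_assoc, List.singleton_append, List.take_left]
  · rintro (rfl | ⟨p, ⟨⟨k, hk, rfl⟩, hc⟩, htake⟩)
    · exact Or.inl rfl
    · right
      simp only at hc
      rw [PySem.List.slice_to _ (by positivity)] at htake
      have h0 : ((0 : Int) + (k : Int)).toNat = k := by omega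
      rw [h0] at htake
      refine ⟨relL.drop (k + 1), ?_⟩
      rw [← htake, List.append_assoc, List.singleton_append, ← hc,
        ← List.drop_eq_getElem_cons hk, List.take_append_drop]

-- A's loop is an existential over the roots
lemma pvLoopA_eq_true_iff (relL : List Char) (roots : List String) :
    pvLoopA relL roots = true ↔ ∃ root ∈ roots,
      PySem.Chars.lower (pvNormRel root.toList) ≠ [] ∧
      (relL = PySem.Chars.lower (pvNormRel root.toList) ∨
        PySem.Chars.startswith relL (PySem.Chars.lower (pvNormRel root.toList) ++ ['/']) = true) := by
  induction roots with
  | nil => simp [pvLoopA]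
  | cons root rest ih =>
    unfold pvLoopA
    simp only [List.mem_cons]
    split_ifs with h1 h2
    · rw [ih]
      constructor
      · rintro ⟨r, hr, hp⟩; exact ⟨r, Or.inr hr, hp⟩
      · rintro ⟨r, (rfl | hr), hne, hm⟩
        · exact absurd h1 hne
        · exact ⟨r, hr, hne, hm⟩
    · simp only [true_iff]
      exact ⟨root, Or.inl rfl, h1, h2⟩
    · constructor
      · intro h
        obtain ⟨r, hr, hp⟩ := ih.1 h
        exact ⟨r, Or.inr hr, hp⟩
      · rintro ⟨r, (rfl | hr), hne, hm⟩
        · exact absurd hm h2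
        · exact ih.2 ⟨r, hr, hne, hm⟩

-- B is the same existential
lemma pvAlt_eq_true_iff (relL : List Char) (roots : List String) :
    ((pvCandidates relL).any (fun c => PySem.Set.contains (pvBases roots) c) = true) ↔
    ∃ root ∈ roots, PySem.Chars.lower (pvNormRel root.toList) ≠ [] ∧
      PySem.Chars.lower (pvNormRel root.toList) ∈ pvCandidates relL := by
  simp only [List.any_eq_true, PySem.Set.contains_eq_listContains, List.contains_eq_mem,
    PySem.Set.mem_ofList, decide_eq_true_eq, pvBases, List.mem_filter, List.mem_map,
    Bool.not_eq_eq_eq_not]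
  constructor
  · rintro ⟨c, hc, ⟨r, hr, rfl⟩, hne⟩
    exact ⟨r, hr, by simpa using hne, hc⟩
  · rintro ⟨r, hr, hne, hc⟩
    exact ⟨_, hc, ⟨r, hr, rfl⟩, by simpa using hne⟩

-- ===== VERDICT (by name: the statement is the Claim_ definition above) =====
theorem in_include_roots_py_spec : Claim_equal_in_include_roots_py := by
  intro rel roots _
  unfold Spec_in_include_roots_py in_include_roots_py in_include_roots_py_alt
  rw [Bool.eq_iff_iff, pvLoopA_eq_true_iff, pvAlt_eq_true_iff]
  constructor
  · rintro ⟨r, hr, hb, hm⟩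
    exact ⟨r, hr, hb, (pv_match_iff _ _).1 hm⟩
  · rintro ⟨r, hr, hb, hm⟩
    exact ⟨r, hr, hb, (pv_match_iff _ _).2 hm⟩
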